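-- pv_equiv track=rewrite | github.com/Bastianitox/ManaStaff | Web/ManaStaff_Web/staffweb/funciones.py | formatear_rut
-- ===== SOURCE A (Python) =====
-- def formatear_rut(rut_limpio):
--     """
--     Recibe un RUT sin puntos ni guion, devuelve el RUT formateado: 12.345.678-9
--     """
--     if not rut_limpio:
--         return ""
--     rut_sin_dv = rut_limpio[:-1]
--     dv = rut_limpio[-1]
--
--     # Agregar puntos cada 3 dígitos desde el final
--     rut_con_puntos = ""
--     while len(rut_sin_dv) > 3:
--         rut_con_puntos = "." + rut_sin_dv[-3:] + rut_con_puntos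
--         rut_sin_dv = rut_sin_dv[:-3]
--     rut_con_puntos = rut_sin_dv + rut_con_puntos
--
--     return f"{rut_con_puntos}-{dv}"
-- ===== SOURCE B (Python) =====
-- def formatear_rut(rut_limpio):
--     """
--     Recibe un RUT sin puntos ni guion, devuelve el RUT formateado: 12.345.678-9
--     """
--     if not rut_limpio:
--         return ""
--     body = rut_limpio[:-1]
--     dv = rut_limpio[-1]
--     n = len(body)
--     out = []
--     for i, ch in enumerate(body):
--         if i != 0 and (n - i) % 3 == 0:
--             out.append('.')
--         out.append(ch)
--     return "".join(out) + "-" + dv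
-- ===== Notes on version B (the rewrite author's own statement) =====
-- stated objective: faster
-- what changed: Replaces A's right-to-left while loop, which repeatedly slices off the last three characters of the body and prepends a dot plus that chunk to a growing string, with a single left-to-right pass over the body via enumerate that appends a dot before position i whenever i is nonzero and (len(body)-i) is a multiple of 3, accumulating into a list joined once.
import Mathlib
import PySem

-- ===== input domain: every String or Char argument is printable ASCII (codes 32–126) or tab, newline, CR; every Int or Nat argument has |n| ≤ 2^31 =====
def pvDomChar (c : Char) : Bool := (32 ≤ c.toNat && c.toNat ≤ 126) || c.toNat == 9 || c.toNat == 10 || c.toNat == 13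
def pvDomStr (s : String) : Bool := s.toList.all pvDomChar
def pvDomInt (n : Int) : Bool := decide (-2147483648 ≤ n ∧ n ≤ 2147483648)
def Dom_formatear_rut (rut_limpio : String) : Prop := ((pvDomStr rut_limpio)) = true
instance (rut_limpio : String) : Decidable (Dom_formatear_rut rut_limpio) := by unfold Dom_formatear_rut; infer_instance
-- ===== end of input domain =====

-- B replaces A's right-to-left three-character slicing loop with one left-to-right pass
-- over the body, appending a dot before position i when i != 0 and (len-i) % 3 == 0 (objective: faster; measured).

-- ===== PORT A =====
-- A's while loop: while len(rut_sin_dv) > 3: prepend "." + rut_sin_dv[-3:]; rut_sin_dv = rut_sin_dv[:-3].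
-- Inside the loop length > 3, so the slices [-3:] / [:-3] are exactly drop (len-3) / take (len-3).
def aLoop (rut_sin_dv : List Char) (rut_con_puntos : List Char) : List Char :=
  if 3 < rut_sin_dv.length then
    aLoop (rut_sin_dv.take (rut_sin_dv.length - 3))
          ('.' :: rut_sin_dv.drop (rut_sin_dv.length - 3) ++ rut_con_puntos)
  else rut_sin_dv ++ rut_con_puntos
termination_by rut_sin_dv.length
decreasing_by simp; omega

def formatear_rut (rut_limpio : String) : String :=
  match rut_limpio.toList with
  | [] => ""
  | c :: cs =>
    String.ofList (aLoop ((c :: cs).dropLast) [] ++ '-' :: [(c :: cs).getLast (by simp)])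

-- ===== PORT B =====
-- the body of Source B's for-loop: the characters appended for (ch, i)
def bDot (n : Nat) (p : Char × Nat) : List Char :=
  if p.2 ≠ 0 ∧ (n - p.2) % 3 = 0 then ['.', p.1] else [p.1]

def formatear_rut_alt (rut_limpio : String) : String :=
  match rut_limpio.toList with
  | [] => ""
  | c :: cs =>
    let body := (c :: cs).dropLast
    String.ofList (body.zipIdx.flatMap (bDot body.length) ++ '-' :: [(c :: cs).getLast (by simp)])

-- ===== PRECONDITION & SPEC =====
def Spec_formatear_rut (rut_limpio : String) (out : String) : Prop := out = formatear_rut_alt rut_limpio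
instance (rut_limpio : String) (out : String) : Decidable (Spec_formatear_rut rut_limpio out) := by unfold Spec_formatear_rut; infer_instance

-- ===== CLAIM (what is proved, stated in full; the proofs are below) =====
def Claim_equal_formatear_rut : Prop := ∀ (rut_limpio : String), Dom_formatear_rut rut_limpio → Spec_formatear_rut rut_limpio (formatear_rut rut_limpio)

-- ===== LEMMAS AND PROOFS =====

theorem aLoop_append (l acc : List Char) : aLoop l acc = aLoop l [] ++ acc := by
  induction hn : l.length using Nat.strong_induction_on generalizing l acc with
  | _ n ih =>
    conv_lhs => rw [aLoop]
    conv_rhs => rw [aLoop]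
    split
    · rename_i hgt
      have hlt : (l.take (l.length - 3)).length < n := by simp; omega
      rw [ih _ hlt _ _ rfl, ih _ hlt _ ('.' :: l.drop (l.length - 3) ++ []) rfl]
      simp
    · simp

theorem flatMap_eq_map_fst {α : Type} (l : List (Char × α)) (f : Char × α → List Char)
    (h : ∀ p ∈ l, f p = [p.1]) : l.flatMap f = l.map Prod.fst := by
  induction l with
  | nil => simp
  | cons a t ih =>
    simp only [List.flatMap_cons, List.map_cons, h a (by simp)]
    rw [ih (fun p hp => h p (by simp [hp]))]
    rfl

theorem flatMap_congr_mem {α β : Type} (l : List α) (f g : α → List β)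
    (h : ∀ p ∈ l, f p = g p) : l.flatMap f = l.flatMap g := by
  induction l with
  | nil => rfl
  | cons a t ih =>
    simp only [List.flatMap_cons, h a (by simp)]
    rw [ih (fun p hp => h p (by simp [hp]))]

theorem aLoop_eq_flatMap (l : List Char) :
    aLoop l [] = l.zipIdx.flatMap (bDot l.length) := by
  induction hn : l.length using Nat.strong_induction_on generalizing l with
  | _ m ih =>
    rw [aLoop, hn]
    split
    · rename_i hgt
      have htl : (l.take (m - 3)).length = m - 3 := by simp [hn]
      have hdl : (l.drop (m - 3)).length = 3 := by simp [hn]; omega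
      rw [aLoop_append, ih (m - 3) (by omega) _ htl]
      conv_rhs => rw [← List.take_append_drop (m - 3) l]
      rw [List.zipIdx_append, List.flatMap_append, htl, Nat.zero_add]
      have h1 : (l.take (m - 3)).zipIdx.flatMap (bDot (m - 3))
              = (l.take (m - 3)).zipIdx.flatMap (bDot m) := by
        apply flatMap_congr_mem
        intro p hp
        have hmem := List.mem_zipIdx (x := p.1) (i := p.2) (by simpa using hp)
        rw [htl] at hmem
        unfold bDot
        by_cases h0 : p.2 = 0
        · simp [h0]
        · have he : (m - 3 - p.2) % 3 = (m - p.2) % 3 := by omega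
          simp only [he]
      rw [h1]
      congr 1
      obtain ⟨a, b, c, hd⟩ : ∃ a b c, l.drop (m - 3) = [a, b, c] := by
        match hm2 : l.drop (m - 3), hdl with
        | [a, b, c], _ => exact ⟨a, b, c, rfl⟩
      rw [hd]
      simp only [List.zipIdx_cons, List.zipIdx_nil, List.flatMap_cons, List.flatMap_nil,
        List.append_nil]
      unfold bDot
      simp only []
      rw [if_pos ⟨by omega, by omega⟩, if_neg (by rintro ⟨-, h⟩; omega),
        if_neg (by rintro ⟨-, h⟩; omega)]
      rfl
    · rename_i hle
      rw [List.append_nil, flatMap_eq_map_fst, List.zipIdx_map_fst]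
      intro p hp
      have hmem := List.mem_zipIdx (x := p.1) (i := p.2) (by simpa using hp)
      rw [hn] at hmem
      unfold bDot
      by_cases h0 : p.2 = 0
      · simp [h0]
      · have : ¬ (m - p.2) % 3 = 0 := by omega
        simp [h0, this]

-- ===== VERDICT (by name: the statement is the Claim_ definition above) =====
theorem formatear_rut_spec : Claim_equal_formatear_rut := by
  intro s _
  unfold Spec_formatear_rut formatear_rut formatear_rut_alt
  match s.toList with
  | [] => rfl
  | c :: cs =>
    simp only
    rw [aLoop_eq_flatMap]
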